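-- pv_equiv track=rewrite | github.com/it-tanhoa1/tanhoa-label-app | generate_labels_all.py | columnize_rows
-- ===== SOURCE A (Python) =====
-- def columnize_rows(start_n: int, end_n: int):
--     total = max(0, end_n - start_n + 1)
--     if total <= 0: return []
--     base, rem = divmod(total, 4)
--     sizes = [base + (1 if i < rem else 0) for i in range(4)]
--     cols = []; cur = start_n
--     for s in sizes:
--         cols.append(list(range(cur, cur + s))); cur += s
--     maxlen = max(len(c) for c in cols) if cols else 0
--     rows = []
--     for r in range(maxlen):
--         rows.append([
--             cols[0][r] if r < len(cols[0]) else None,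
--             cols[1][r] if r < len(cols[1]) else None,
--             cols[2][r] if r < len(cols[2]) else None,
--             cols[3][r] if r < len(cols[3]) else None,
--         ])
--     return rows
-- ===== SOURCE B (Python) =====
-- def columnize_rows(start_n: int, end_n: int):
--     total = end_n - start_n + 1
--     if total <= 0:
--         return []
--     q, rem = divmod(total, 4)
--     # cell (r, i) holds start_n + off_i + r when r < size_i, else None
--     rows = []
--     for r in range(q + (1 if rem else 0)):
--         row = []
--         off = 0
--         for i in range(4):
--             s = q + (1 if i < rem else 0)
--             row.append(start_n + off + r if r < s else None)
--             off += s
--         rows.append(row)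
--     return rows
-- ===== Notes on version B (the rewrite author's own statement) =====
-- stated objective: simpler
-- what changed: B computes each cell arithmetically (row-major closed form from divmod) instead of materializing four column lists and transposing them with None padding via max length.
import Mathlib
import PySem

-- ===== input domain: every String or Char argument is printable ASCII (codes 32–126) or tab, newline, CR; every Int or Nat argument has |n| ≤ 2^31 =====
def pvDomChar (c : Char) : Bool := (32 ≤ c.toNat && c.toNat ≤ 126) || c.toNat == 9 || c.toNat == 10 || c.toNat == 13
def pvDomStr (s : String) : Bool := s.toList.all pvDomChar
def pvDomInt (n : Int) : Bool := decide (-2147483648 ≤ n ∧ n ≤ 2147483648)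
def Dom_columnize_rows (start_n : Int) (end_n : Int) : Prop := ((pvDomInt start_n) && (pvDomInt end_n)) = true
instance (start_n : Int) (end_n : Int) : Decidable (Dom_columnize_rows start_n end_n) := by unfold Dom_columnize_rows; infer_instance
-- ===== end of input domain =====

-- B replaces A's build-columns-then-transpose by a row-major closed form: each cell is computed
-- arithmetically from divmod(total, 4); objective: simpler (no intermediate column lists).

-- ===== PORT A =====
-- `cols[i][r] if r < len(cols[i]) else None`; cols always has 4 entries, the getD [] is only a totality guard
def aEntry (cols : List (List Int)) (i : Int) (r : Int) : Option Int :=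
  let c := PySem.List.pyGetD cols i []
  if r < (c.length : Int) then PySem.List.pyGet? c r else none

def columnize_rows (start_n : Int) (end_n : Int) : List (List (Option Int)) :=
  let total := max 0 (end_n - start_n + 1)
  if total ≤ 0 then []
  else
    let base := PySem.Int.floordiv total 4
    let rem := PySem.Int.mod total 4
    let sizes := (PySem.List.pyRange 0 4 1).map (fun i => base + (if i < rem then (1:Int) else 0))
    let st := sizes.foldl (fun (st : List (List Int) × Int) s =>
        (st.1 ++ [PySem.List.pyRange st.2 (st.2 + s) 1], st.2 + s)) ([], start_n)
    let cols := st.1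
    let maxlen := match PySem.List.max? (cols.map (fun c => (c.length : Int))) (fun x => x) with
      | some m => m
      | none => 0
    (PySem.List.pyRange 0 maxlen 1).map (fun r =>
      [aEntry cols 0 r, aEntry cols 1 r, aEntry cols 2 r, aEntry cols 3 r])

-- ===== PORT B =====
def columnize_rows_alt (start_n : Int) (end_n : Int) : List (List (Option Int)) :=
  let total := end_n - start_n + 1
  if total ≤ 0 then []
  else
    let q := PySem.Int.floordiv total 4
    let rem := PySem.Int.mod total 4
    (PySem.List.pyRange 0 (q + (if rem ≠ 0 then 1 else 0)) 1).map (fun r =>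
      ((PySem.List.pyRange 0 4 1).foldl (fun (st : List (Option Int) × Int) i =>
          let s := q + (if i < rem then (1:Int) else 0)
          (st.1 ++ [if r < s then some (start_n + st.2 + r) else none], st.2 + s))
        ([], 0)).1)

-- ===== PRECONDITION & SPEC =====
def Spec_columnize_rows (start_n : Int) (end_n : Int) (out : List (List (Option Int))) : Prop := out = columnize_rows_alt start_n end_n
instance (start_n : Int) (end_n : Int) (out : List (List (Option Int))) : Decidable (Spec_columnize_rows start_n end_n out) := by unfold Spec_columnize_rows; infer_instance

-- ===== CLAIM (what is proved, stated in full; the proofs are below) =====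
def Claim_equal_columnize_rows : Prop := ∀ (start_n : Int) (end_n : Int), Dom_columnize_rows start_n end_n → Spec_columnize_rows start_n end_n (columnize_rows start_n end_n)

-- ===== LEMMAS AND PROOFS =====
theorem pv_pyGet?_pyRange (a b r : Int) (h0 : 0 ≤ r) (h1 : r < b - a) :
    PySem.List.pyGet? (PySem.List.pyRange a b 1) r = some (a + r) := by
  rw [PySem.List.pyGet?_of_nonneg _ h0, PySem.List.getElem?_pyRange_one]
  simp [Int.toNat_of_nonneg h0]
  omega

theorem pv_sel0 (c0 c1 c2 c3 : List Int) : (PySem.List.pyGet? [c0,c1,c2,c3] (0:Int)).getD [] = c0 := by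
  simp [PySem.List.pyGet?, PySem.List.pyIdx?]
theorem pv_sel1 (c0 c1 c2 c3 : List Int) : (PySem.List.pyGet? [c0,c1,c2,c3] (1:Int)).getD [] = c1 := by
  simp [PySem.List.pyGet?, PySem.List.pyIdx?]
theorem pv_sel2 (c0 c1 c2 c3 : List Int) : (PySem.List.pyGet? [c0,c1,c2,c3] (2:Int)).getD [] = c2 := by
  simp [PySem.List.pyGet?, PySem.List.pyIdx?]
theorem pv_sel3 (c0 c1 c2 c3 : List Int) : (PySem.List.pyGet? [c0,c1,c2,c3] (3:Int)).getD [] = c3 := by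
  simp [PySem.List.pyGet?, PySem.List.pyIdx?]

-- ===== VERDICT (by name: the statement is the Claim_ definition above) =====
theorem columnize_rows_spec : Claim_equal_columnize_rows := by
  intro s e _
  unfold Spec_columnize_rows columnize_rows columnize_rows_alt
  by_cases h : e - s + 1 ≤ 0
  · simp only [h, if_pos, max_eq_left (by omega : e - s + 1 ≤ 0), le_refl, if_pos]
  · rw [not_le] at h
    have hmax : max 0 (e - s + 1) = e - s + 1 := by omega
    rw [hmax]
    rw [if_neg (by omega), if_neg (by omega)]
    rw [PySem.Int.floordiv_eq_ediv_of_pos (by norm_num), PySem.Int.mod_eq_emod_of_pos (by norm_num)]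
    set t := e - s + 1 with ht
    set q := t / 4 with hqd
    set rem := t % 4 with hrd
    have hq0 : 0 ≤ q := Int.ediv_nonneg (by omega) (by norm_num)
    have hrng : PySem.List.pyRange 0 4 1 = [0,1,2,3] := by decide
    rw [hrng]
    simp only [List.map, List.foldl]
    have hr0 : 0 ≤ rem := Int.emod_nonneg t (by norm_num)
    have hr4 : rem < 4 := Int.emod_lt_of_pos t (by norm_num)
    set z0 := (if (0:Int) < rem then (1:Int) else 0) with hz0
    set z1 := (if (1:Int) < rem then (1:Int) else 0) with hz1
    set z2 := (if (2:Int) < rem then (1:Int) else 0) with hz2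
    set z3 := (if (3:Int) < rem then (1:Int) else 0) with hz3
    have h30 : 0 ≤ z3 := by rw [hz3]; split_ifs <;> omega
    have h32 : z3 ≤ z2 := by rw [hz3, hz2]; split_ifs <;> omega
    have h21 : z2 ≤ z1 := by rw [hz2, hz1]; split_ifs <;> omega
    have h10 : z1 ≤ z0 := by rw [hz1, hz0]; split_ifs <;> omega
    have h01 : z0 ≤ 1 := by rw [hz0]; split_ifs <;> omega
    have hne : (if rem ≠ 0 then (1:Int) else 0) = z0 := by rw [hz0]; split_ifs <;> omega
    rw [hne]
    simp only [List.nil_append, List.cons_append, List.map,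
      PySem.List.length_pyRange_one]
    have e0 : s + (q + z0) - s = q + z0 := by ring
    have e1 : s + (q + z0) + (q + z1) - (s + (q + z0)) = q + z1 := by ring
    have e2 : s + (q + z0) + (q + z1) + (q + z2) - (s + (q + z0) + (q + z1)) = q + z2 := by ring
    have e3 : s + (q + z0) + (q + z1) + (q + z2) + (q + z3) - (s + (q + z0) + (q + z1) + (q + z2)) = q + z3 := by ring
    rw [e0, e1, e2, e3]
    rw [Int.toNat_of_nonneg (show (0:Int) ≤ q + z0 by omega),
        Int.toNat_of_nonneg (show (0:Int) ≤ q + z1 by omega),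
        Int.toNat_of_nonneg (show (0:Int) ≤ q + z2 by omega),
        Int.toNat_of_nonneg (show (0:Int) ≤ q + z3 by omega)]
    rw [PySem.List.max?_id_cons]
    simp only [List.foldl]
    have hmx : max (max (max (q + z0) (q + z1)) (q + z2)) (q + z3) = q + z0 := by omega
    rw [hmx]
    apply List.map_congr_left
    intro r hrr
    rw [PySem.List.mem_pyRange_one] at hrr
    simp only [aEntry, PySem.List.pyGetD, pv_sel0, pv_sel1, pv_sel2, pv_sel3,
      PySem.List.length_pyRange_one]
    rw [e0, e1, e2, e3]
    rw [Int.toNat_of_nonneg (show (0:Int) ≤ q + z0 by omega),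
        Int.toNat_of_nonneg (show (0:Int) ≤ q + z1 by omega),
        Int.toNat_of_nonneg (show (0:Int) ≤ q + z2 by omega),
        Int.toNat_of_nonneg (show (0:Int) ≤ q + z3 by omega)]
    refine List.cons_eq_cons.mpr ⟨?_, List.cons_eq_cons.mpr ⟨?_, List.cons_eq_cons.mpr ⟨?_, List.cons_eq_cons.mpr ⟨?_, rfl⟩⟩⟩⟩ <;>
      · split_ifs with hh
        · rw [pv_pyGet?_pyRange _ _ _ (by omega) (by omega)]
          congr 1
          omega
        · rfl
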